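-- pv_equiv track=rewrite | github.com/gbodeen/algorhythmix | python/project-euler/PE026.py | dec_cycle_len
-- ===== SOURCE A (Python) =====
-- def dec_cycle_len(n):
--   remainder = 10
--   prevs = {}
--   for i in range(1, n + 1):
--     if remainder == 0:
--       return 0
--     if remainder in prevs:
--       return i - prevs[remainder]
--     prevs[remainder] = i
--     remainder = 10 * (remainder % n)
-- ===== SOURCE B (Python) =====
-- def dec_cycle_len(n):
--     m = n
--     while m % 2 == 0:
--         m //= 2
--     while m % 5 == 0:
--         m //= 5
--     if m == 1:
--         return 0
--     r = 10 % m
--     length = 1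
--     while r != 1:
--         r = (r * 10) % m
--         length += 1
--     return length
-- ===== Notes on version B (the rewrite author's own statement) =====
-- stated objective: faster
-- what changed: Instead of simulating long division while storing every remainder with its index in a dict and scanning for the first repeat, B strips the factors two and five from n and then computes the multiplicative order of ten modulo the stripped part with a single constant-memory modular loop (zero if the stripped part is one).
-- outside the precondition, e.g. on dec_cycle_len(1): A returns None, B returns 0; on dec_cycle_len(0): A returns None, B does not finish within the time limit
import Mathlib
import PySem

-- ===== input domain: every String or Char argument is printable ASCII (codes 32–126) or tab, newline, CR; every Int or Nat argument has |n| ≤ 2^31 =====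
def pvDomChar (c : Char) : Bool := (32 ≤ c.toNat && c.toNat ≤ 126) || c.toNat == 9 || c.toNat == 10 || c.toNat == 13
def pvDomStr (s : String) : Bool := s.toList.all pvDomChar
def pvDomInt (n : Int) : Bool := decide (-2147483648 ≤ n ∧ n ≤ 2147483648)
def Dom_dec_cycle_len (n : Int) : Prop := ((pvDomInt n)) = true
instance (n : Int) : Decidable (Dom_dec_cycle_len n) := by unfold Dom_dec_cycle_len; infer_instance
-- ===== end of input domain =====

-- B replaces A's dict-of-all-remainders long-division scan by stripping the factors 2 and 5 from n
-- and running a constant-memory multiplicative-order loop; measured faster (constant factor).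

-- ===== PORT A =====
-- A's for-loop over range(1, n+1); state = (remainder, prevs); none = the loop fell through (Python returns None)
def decCycleLoopA (n : Int) : List Int → Int → PySem.Dict Int Int → Option Int
  | [], _, _ => none
  | i :: is, r, d =>
    if r = 0 then some 0
    else if d.contains r then some (i - d.getD r 0)
    else decCycleLoopA n is (10 * PySem.Int.mod r n) (d.insert r i)

def dec_cycle_len (n : Int) : Int :=
  (decCycleLoopA n (PySem.List.pyRange 1 (n + 1) 1) 10 PySem.Dict.empty).getD 0

-- ===== PORT B =====
-- while m % p == 0: m //= p   (the fuel only makes the loop structurally total; |n| steps more than suffice on Pre_)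
def stripLoopB (p : Int) : Nat → Int → Int
  | 0, m => m
  | fuel + 1, m =>
    if PySem.Int.mod m p = 0 then stripLoopB p fuel (PySem.Int.floordiv m p) else m

-- while r != 1: r = (r * 10) % m; length += 1   (fuel only for totality; |m| steps suffice on Pre_)
def ordLoopB (m : Int) : Nat → Int → Int → Int
  | 0, _, len => len
  | fuel + 1, r, len =>
    if r ≠ 1 then ordLoopB m fuel (PySem.Int.mod (r * 10) m) (len + 1) else len

def dec_cycle_len_alt (n : Int) : Int :=
  let m1 := stripLoopB 2 n.natAbs n
  let m := stripLoopB 5 m1.natAbs m1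
  if m = 1 then 0
  else ordLoopB m m.natAbs (PySem.Int.mod 10 m) 1

-- ===== PRECONDITION & SPEC =====
-- Pre_ excludes exactly n ≤ 1, where A's loop never returns and Python A yields None, which is not an int.
def Pre_dec_cycle_len (n : Int) : Prop := 2 ≤ n
instance (n : Int) : Decidable (Pre_dec_cycle_len n) := by unfold Pre_dec_cycle_len; infer_instance
def pvWitness_dec_cycle_len : Int := 7

def Spec_dec_cycle_len (n : Int) (out : Int) : Prop := out = dec_cycle_len_alt n
instance (n : Int) (out : Int) : Decidable (Spec_dec_cycle_len n out) := by unfold Spec_dec_cycle_len; infer_instance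

-- ===== CLAIM (what is proved, stated in full; the proofs are below) =====
def Claim_equal_dec_cycle_len : Prop :=
  ∀ (n : Int), Dom_dec_cycle_len n → Pre_dec_cycle_len n → Spec_dec_cycle_len n (dec_cycle_len n)

-- ===== LEMMAS AND PROOFS =====

lemma stripLoopB_spec (p : Int) (hp : 1 < p) :
    ∀ (fuel : Nat) (m : Int), 0 < m → m.toNat ≤ fuel →
      ∃ a : Nat, m = p ^ a * stripLoopB p fuel m ∧ 0 < stripLoopB p fuel m ∧
        ¬ p ∣ stripLoopB p fuel m := by
  intro fuel
  induction fuel with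
  | zero => intro m hm hf; omega
  | succ fuel ih =>
    intro m hm hf
    simp only [stripLoopB]
    by_cases hd : p ∣ m
    · rw [if_pos ((PySem.Int.mod_eq_zero_iff_dvd m p).mpr hd),
        PySem.Int.floordiv_eq_ediv_of_pos (by omega)]
      have hple : p ≤ m := Int.le_of_dvd hm hd
      have hq : m / p * p = m := Int.ediv_mul_cancel hd
      have hqpos : 0 < m / p := Int.ediv_pos_of_pos_of_dvd hm (by omega) hd
      have hqlt : m / p < m := by nlinarith
      obtain ⟨a, ha, hpos, hnd⟩ := ih (m / p) hqpos (by omega)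
      exact ⟨a + 1, by rw [pow_succ]; nlinarith [ha], hpos, hnd⟩
    · rw [if_neg (fun h => hd ((PySem.Int.mod_eq_zero_iff_dvd m p).mp h))]
      exact ⟨0, by ring, hm, hd⟩

lemma ordLoopB_run (M t : Nat) (htm : 10 ^ t % M = 1)
    (hmin : ∀ k, 0 < k → k < t → 10 ^ k % M ≠ 1) :
    ∀ (fuel k : Nat), 0 < k → k ≤ t → t - k ≤ fuel →
      ordLoopB (M : Int) fuel ((10 ^ k % M : Nat) : Int) (k : Int) = (t : Int) := by
  intro fuel
  induction fuel with
  | zero =>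
    intro k hk hkt hf
    have : k = t := by omega
    simp [ordLoopB, this]
  | succ fuel ih =>
    intro k hk hkt hf
    simp only [ordLoopB]
    by_cases hke : k = t
    · subst hke; rw [htm]; simp
    · have hklt : k < t := lt_of_le_of_ne hkt hke
      rw [if_pos (by exact_mod_cast hmin k hk hklt)]
      have hr : PySem.Int.mod (((10 ^ k % M : Nat) : Int) * 10) (M : Int)
          = ((10 ^ (k + 1) % M : Nat) : Int) := by
        have h1 : (((10 ^ k % M : Nat) : Int) * 10) = (((10 ^ k % M) * 10 : Nat) : Int) := by
          push_cast; ring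
        rw [h1, PySem.Int.mod_natCast]
        congr 1
        rw [pow_succ]
        exact Nat.mod_mul_mod _ _ _
      rw [hr]
      have h2 : ((k : Int) + 1) = ((k + 1 : Nat) : Int) := by push_cast; ring
      rw [h2]
      exact ih (k + 1) (by omega) hklt (by omega)

lemma decCycleLoopA_run (N : Nat) (Rr : Nat → Nat)
    (hstep : ∀ j, Rr (j + 1) = 10 * (Rr j % N))
    (E : Nat) (V : Int) (hE1 : 1 ≤ E) (hEN : E ≤ N)
    (hnz : ∀ k, k + 1 < E → Rr k ≠ 0)
    (hinj : ∀ j k, j < k → k + 1 < E → Rr j ≠ Rr k)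
    (hexit : (Rr (E - 1) = 0 ∧ V = 0) ∨
      (Rr (E - 1) ≠ 0 ∧ ∃ j, j + 1 < E ∧ Rr j = Rr (E - 1) ∧ V = (E : Int) - ((j : Int) + 1))) :
    ∀ (c i : Nat) (d : PySem.Dict Int Int), 1 ≤ i → i ≤ E → E - i ≤ c →
      d.items = (List.range (i - 1)).map (fun j => (((Rr j : Nat) : Int), ((j : Int) + 1))) →
      decCycleLoopA (N : Int) (PySem.List.pyRange (i : Int) ((N : Int) + 1) 1) ((Rr (i - 1) : Nat) : Int) d
        = some V := by
  have hexitC : ∀ (d : PySem.Dict Int Int),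
      d.items = (List.range (E - 1)).map (fun j => (((Rr j : Nat) : Int), ((j : Int) + 1))) →
      decCycleLoopA (N : Int) (PySem.List.pyRange (E : Int) ((N : Int) + 1) 1)
        ((Rr (E - 1) : Nat) : Int) d = some V := by
    intro d hitems
    rw [PySem.List.pyRange_one_cons (by exact_mod_cast Nat.lt_succ_of_le hEN)]
    simp only [decCycleLoopA]
    rcases hexit with ⟨hz, hV⟩ | ⟨hnz', j, hjE, hjeq, hV⟩
    · rw [if_pos (by exact_mod_cast hz), hV]
    · rw [if_neg (by exact_mod_cast hnz')]
      have hnodup : d.keys.Nodup := by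
        have hk : d.keys = (List.range (E - 1)).map (fun j => ((Rr j : Nat) : Int)) := by
          simp only [PySem.Dict.keys, hitems, List.map_map]; rfl
        rw [hk]
        refine List.Nodup.map_on ?_ List.nodup_range
        intro x hx y hy hxy
        simp only [List.mem_range] at hx hy
        by_contra hne
        rcases Nat.lt_or_ge x y with h | h
        · exact hinj x y h (by omega) (by exact_mod_cast hxy)
        · exact hinj y x (by omega) (by omega) (by exact_mod_cast hxy.symm)
      have hmem : ((((Rr j : Nat) : Int)), ((j : Int) + 1)) ∈ d.items := by
        rw [hitems]; exact List.mem_map_of_mem (List.mem_range.mpr (by omega))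
      rw [← hjeq]
      have hget := PySem.Dict.get?_of_mem_items d hmem hnodup
      rw [PySem.Dict.contains_eq_isSome_get?, hget]
      simp only [Option.isSome_some, if_true]
      rw [PySem.Dict.getD_of_mem_items d hmem hnodup]
      rw [hV]
  intro c
  induction c with
  | zero =>
    intro i d hi hiE hc hitems
    have hie : i = E := by omega
    subst hie
    exact hexitC d hitems
  | succ c ih =>
    intro i d hi hiE hc hitems
    by_cases hie : i = E
    · subst hie; exact hexitC d hitems
    · have hiltE : i < E := lt_of_le_of_ne hiE hie
      rw [PySem.List.pyRange_one_cons (by exact_mod_cast Nat.lt_succ_of_le (le_trans hiE hEN))]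
      simp only [decCycleLoopA]
      rw [if_neg (by exact_mod_cast hnz (i - 1) (by omega))]
      have hkeys : d.keys = (List.range (i - 1)).map (fun j => ((Rr j : Nat) : Int)) := by
        simp only [PySem.Dict.keys, hitems, List.map_map]; rfl
      have hcon : d.contains ((Rr (i - 1) : Nat) : Int) = false := by
        rw [PySem.Dict.contains_eq_decide_mem_keys, hkeys]
        simp only [decide_eq_false_iff_not, List.mem_map, List.mem_range]
        rintro ⟨x, hx, hxe⟩
        exact hinj x (i - 1) (by omega) (by omega) (by exact_mod_cast hxe)
      rw [hcon]
      simp only [Bool.false_eq_true, if_false]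
      have harg : 10 * PySem.Int.mod ((Rr (i - 1) : Nat) : Int) (N : Int) = ((Rr i : Nat) : Int) := by
        rw [PySem.Int.mod_natCast]
        have hs := hstep (i - 1)
        rw [Nat.sub_add_cancel hi] at hs
        rw [hs]; push_cast; ring
      rw [harg]
      have hid : (i : Int) + 1 = ((i + 1 : Nat) : Int) := by push_cast; ring
      rw [hid]
      refine ih (i + 1) _ (by omega) (by omega) (by omega) ?_
      rw [PySem.Dict.items_insert_of_not_contains d _ hcon, hitems]
      have hri : i + 1 - 1 = (i - 1) + 1 := by omega
      rw [hri, List.range_succ, List.map_append]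
      simp only [List.map_cons, List.map_nil]
      rw [show ((i : Nat) : Int) = ((i - 1 : Nat) : Int) + 1 by omega]

theorem dec_cycle_len_spec : Claim_equal_dec_cycle_len := by
  intro n _ hpre
  unfold Pre_dec_cycle_len at hpre
  unfold Spec_dec_cycle_len
  have hnpos : 0 < n := by omega
  obtain ⟨A2, hA2, hm1pos, hnd2⟩ :=
    stripLoopB_spec 2 (by norm_num) n.natAbs n hnpos (by omega)
  set m1 := stripLoopB 2 n.natAbs n with hm1def
  obtain ⟨B5, hB5, hmpos, hnd5⟩ :=
    stripLoopB_spec 5 (by norm_num) m1.natAbs m1 hm1pos (by omega)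
  set m := stripLoopB 5 m1.natAbs m1 with hmdef
  have hnd2m : ¬ (2:Int) ∣ m := fun h => hnd2 (hB5 ▸ h.mul_left _)
  set N := n.toNat with hNdef
  set M := m.toNat with hMdef
  have hnN : n = (N : Int) := by omega
  have hmM : m = (M : Int) := by omega
  have hN2 : 2 ≤ N := by omega
  have hM1 : 1 ≤ M := by omega
  have hNfac : N = 2 ^ A2 * 5 ^ B5 * M := by
    have h : (N : Int) = ((2 ^ A2 * 5 ^ B5 * M : Nat) : Int) := by
      push_cast
      rw [← hmM, ← hnN, hA2, hB5]; ring
    exact_mod_cast h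
  set c := 2 ^ A2 * 5 ^ B5 with hcdef
  have hcpos : 0 < c := by positivity
  have hNc : N = c * M := hNfac
  have h2M : ¬ 2 ∣ M := by
    intro h
    exact hnd2m (by rw [hmM]; exact_mod_cast Int.natCast_dvd_natCast.mpr h)
  have h5M : ¬ 5 ∣ M := by
    intro h
    exact hnd5 (by rw [hmM]; exact_mod_cast Int.natCast_dvd_natCast.mpr h)
  have c2 : Nat.Coprime 2 M := (Nat.Prime.coprime_iff_not_dvd Nat.prime_two).mpr h2M
  have c5 : Nat.Coprime 5 M := (Nat.Prime.coprime_iff_not_dvd (by norm_num)).mpr h5M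
  have hcop10 : Nat.Coprime M 10 := by
    have h := Nat.Coprime.mul_left c2 c5
    norm_num at h
    exact h.symm
  have hcopcM : Nat.Coprime c M :=
    Nat.Coprime.mul_left (Nat.Coprime.pow_left A2 c2) (Nat.Coprime.pow_left B5 c5)
  have hcop_c_sub : ∀ d : Nat, 1 ≤ d → Nat.Coprime c (10 ^ d - 1) := by
    intro d hd
    have h2d : 2 ∣ 10 ^ d := dvd_pow (by norm_num) (by omega)
    have h5d : 5 ∣ 10 ^ d := dvd_pow (by norm_num) (by omega)
    have h1 : 1 ≤ 10 ^ d := Nat.one_le_pow _ _ (by norm_num)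
    have d2 : Nat.Coprime 2 (10 ^ d - 1) :=
      (Nat.Prime.coprime_iff_not_dvd Nat.prime_two).mpr (by omega)
    have d5 : Nat.Coprime 5 (10 ^ d - 1) :=
      (Nat.Prime.coprime_iff_not_dvd (by norm_num)).mpr (by omega)
    exact Nat.Coprime.mul_left (Nat.Coprime.pow_left A2 d2) (Nat.Coprime.pow_left B5 d5)
  have hdvdw : c ∣ 10 ^ (A2 + B5) := by
    have h : (2:Nat) ^ (A2 + B5) * 5 ^ (A2 + B5) = 10 ^ (A2 + B5) := by
      rw [← Nat.mul_pow]
    rw [← h]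
    exact Nat.mul_dvd_mul (pow_dvd_pow 2 (by omega)) (pow_dvd_pow 5 (by omega))
  have hsex : ∃ s : Nat, c ∣ 10 ^ s := ⟨A2 + B5, hdvdw⟩
  set s := Nat.find hsex with hsdef
  have hsspec : c ∣ 10 ^ s := Nat.find_spec hsex
  have hsmin : ∀ k, k < s → ¬ c ∣ 10 ^ k := fun k hk => Nat.find_min hsex hk
  have hcs : s + 1 ≤ c := by
    have hsle : s ≤ A2 + B5 := Nat.find_min' hsex hdvdw
    have h1 : 2 ^ (A2 + B5) ≤ c := by
      rw [hcdef, pow_add]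
      exact Nat.mul_le_mul_left _ (Nat.pow_le_pow_left (by norm_num) B5)
    have h2 : A2 + B5 < 2 ^ (A2 + B5) := Nat.lt_two_pow_self
    omega
  have hkey : ∀ j d : Nat, 1 ≤ d →
      (10 ^ j % N = 10 ^ (j + d) % N ↔ (c ∣ 10 ^ j ∧ M ∣ 10 ^ d - 1)) := by
    intro j d hd
    have hle : 10 ^ j ≤ 10 ^ (j + d) := Nat.pow_le_pow_right (by norm_num) (by omega)
    have hfac : 10 ^ (j + d) - 10 ^ j = 10 ^ j * (10 ^ d - 1) := by
      rw [Nat.mul_sub, mul_one, ← pow_add]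
    constructor
    · intro h
      have hdvd : N ∣ 10 ^ j * (10 ^ d - 1) := by
        rw [← hfac]; exact (Nat.modEq_iff_dvd' hle).mp h
      rw [hNc] at hdvd
      have hcd : c ∣ 10 ^ j * (10 ^ d - 1) := (dvd_mul_right c M).trans hdvd
      have hMd : M ∣ 10 ^ j * (10 ^ d - 1) := (dvd_mul_left M c).trans hdvd
      exact ⟨Nat.Coprime.dvd_of_dvd_mul_right (hcop_c_sub d hd) hcd,
             Nat.Coprime.dvd_of_dvd_mul_left (Nat.Coprime.pow_right j hcop10) hMd⟩
    · rintro ⟨hc, hM⟩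
      apply (Nat.modEq_iff_dvd' hle).mpr
      rw [hfac, hNc]
      exact mul_dvd_mul hc hM
  have hzero : ∀ k : Nat, (10 ^ k % N = 0 ↔ (c ∣ 10 ^ k ∧ M = 1)) := by
    intro k
    constructor
    · intro h
      have hNd : N ∣ 10 ^ k := Nat.dvd_of_mod_eq_zero h
      rw [hNc] at hNd
      exact ⟨(dvd_mul_right c M).trans hNd,
        Nat.Coprime.eq_one_of_dvd (Nat.Coprime.pow_right k hcop10)
          ((dvd_mul_left M c).trans hNd)⟩
    · rintro ⟨hc, hM1'⟩
      have hNd : N ∣ 10 ^ k := by rw [hNc, hM1', mul_one]; exact hc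
      exact Nat.dvd_iff_mod_eq_zero.mp hNd
  set Rr : Nat → Nat := fun j => 10 * (10 ^ j % N) with hRrdef
  have hstep : ∀ j, Rr (j + 1) = 10 * (Rr j % N) := by
    intro j
    simp only [hRrdef]
    congr 1
    conv_rhs => rw [Nat.mul_mod_mod]
    rw [← pow_succ']
  have hRrz : ∀ k, Rr k = 0 ↔ (c ∣ 10 ^ k ∧ M = 1) := by
    intro k
    simp only [hRrdef]
    rw [← hzero k]
    omega
  have hRrinj : ∀ j k, j < k → Rr j = Rr k → (c ∣ 10 ^ j ∧ M ∣ 10 ^ (k - j) - 1) := by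
    intro j k hjk h
    simp only [hRrdef] at h
    exact (hkey j (k - j) (by omega)).mp
      (by rw [show j + (k - j) = k by omega]; omega)
  have hR0 : ((Rr 0 : Nat) : Int) = 10 := by
    simp only [hRrdef]
    rw [pow_zero, Nat.mod_eq_of_lt (by omega)]
    norm_num
  have hempty : (PySem.Dict.empty : PySem.Dict Int Int).items
      = (List.range (1 - 1)).map (fun j => (((Rr j : Nat) : Int), ((j : Int) + 1))) := rfl
  by_cases hMcase : M = 1
  · -- terminating decimal: A exits with 0 at iteration s+1; B returns 0 since m = 1
    have hm1 : m = 1 := by omega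
    have hEN : s + 1 ≤ N := by rw [hNc, hMcase, mul_one]; omega
    have hA1 := decCycleLoopA_run N Rr hstep (s + 1) 0 (by omega) hEN
      (fun k hk => by
        rw [Ne, hRrz]; rintro ⟨hd, _⟩; exact hsmin k (by omega) hd)
      (fun j k hjk hkE heq => by
        obtain ⟨hd, _⟩ := hRrinj j k hjk heq
        exact hsmin j (by omega) hd)
      (Or.inl ⟨by rw [show s + 1 - 1 = s from rfl, hRrz]; exact ⟨hsspec, hMcase⟩, rfl⟩)
      (s + 1) 1 PySem.Dict.empty (le_refl 1) (by omega) (by omega) hempty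
    have hAval : dec_cycle_len n = 0 := by
      unfold dec_cycle_len
      rw [hnN]
      have h := hA1
      simp only [Nat.cast_one] at h
      rw [show ((Rr (1 - 1) : Nat) : Int) = 10 from hR0] at h
      rw [h]
      rfl
    have hBval : dec_cycle_len_alt n =
        if m = 1 then 0 else ordLoopB m m.natAbs (PySem.Int.mod 10 m) 1 := rfl
    rw [hAval, hBval, if_pos hm1]
  · have hMgt : 1 < M := by omega
    have hphi : 10 ^ M.totient % M = 1 := by
      have h : 10 ^ M.totient % M = 1 % M := Nat.ModEq.pow_totient hcop10.symm
      rwa [Nat.mod_eq_of_lt hMgt] at h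
    have htotpos : 0 < M.totient := Nat.totient_pos.mpr (by omega)
    have htex : ∃ L : Nat, 0 < L ∧ 10 ^ L % M = 1 := ⟨M.totient, htotpos, hphi⟩
    set t := Nat.find htex with htdef
    obtain ⟨htpos, htm⟩ := Nat.find_spec htex
    have htmin : ∀ k, 0 < k → k < t → 10 ^ k % M ≠ 1 := fun k hk hkt h =>
      Nat.find_min htex hkt ⟨hk, h⟩
    have htltM : t < M :=
      lt_of_le_of_lt (Nat.find_min' htex ⟨htotpos, hphi⟩) (Nat.totient_lt M hMgt)
    have hdvd_iff : ∀ d : Nat, 1 ≤ d → (M ∣ 10 ^ d - 1 ↔ 10 ^ d % M = 1) := by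
      intro d hd
      have h1 : 1 ≤ 10 ^ d := Nat.one_le_pow _ _ (by norm_num)
      rw [← Nat.modEq_iff_dvd' h1]
      unfold Nat.ModEq
      rw [Nat.mod_eq_of_lt hMgt]
      exact ⟨fun h => h.symm, fun h => h.symm⟩
    have hEN : s + t + 1 ≤ N := by
      rw [hNc]
      nlinarith [hcs, htltM, hcpos, hM1]
    have hRrst : Rr s = Rr (s + t + 1 - 1) := by
      have h : 10 ^ s % N = 10 ^ (s + t) % N :=
        (hkey s t htpos).mpr ⟨hsspec, (hdvd_iff t htpos).mpr htm⟩
      simp only [hRrdef]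
      rw [show s + t + 1 - 1 = s + t from rfl, h]
    have hA1 := decCycleLoopA_run N Rr hstep (s + t + 1) ((t : Nat) : Int) (by omega) hEN
      (fun k hk => by rw [Ne, hRrz]; rintro ⟨_, h1⟩; omega)
      (fun j k hjk hkE heq => by
        obtain ⟨hdc, hdM⟩ := hRrinj j k hjk heq
        have hjs : s ≤ j := by
          by_contra h
          exact hsmin j (by omega) hdc
        have htkj : t ≤ k - j := by
          by_contra h
          exact htmin (k - j) (by omega) (by omega) ((hdvd_iff (k - j) (by omega)).mp hdM)
        omega)
      (Or.inr ⟨by rw [Ne, hRrz]; rintro ⟨_, h1⟩; omega,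
        s, by omega, hRrst, by push_cast; ring⟩)
      (s + t + 1) 1 PySem.Dict.empty (le_refl 1) (by omega) (by omega) hempty
    have hAval : dec_cycle_len n = ((t : Nat) : Int) := by
      unfold dec_cycle_len
      rw [hnN]
      have h := hA1
      simp only [Nat.cast_one] at h
      rw [show ((Rr (1 - 1) : Nat) : Int) = 10 from hR0] at h
      rw [h]
      rfl
    have hmne1 : m ≠ 1 := by omega
    have hBval : dec_cycle_len_alt n =
        if m = 1 then 0 else ordLoopB m m.natAbs (PySem.Int.mod 10 m) 1 := rfl
    rw [hAval, hBval, if_neg hmne1, hmM]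
    have hord := ordLoopB_run M t htm htmin M 1 (by omega) (by omega) (by omega)
    rw [pow_one] at hord
    rw [show (10 : Int) = ((10 : Nat) : Int) from rfl, PySem.Int.mod_natCast,
      Int.natAbs_natCast, show (1 : Int) = ((1 : Nat) : Int) from rfl, hord]
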